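-- pv_equiv track=rewrite | github.com/chopralab/Cliquify | candidate_shrinkage/many_large_rings_screening.py | bridge_checking
-- ===== SOURCE A (Python) =====
-- def bridge_checking(cliques):
--     for i in range(len(cliques)):
--         for j in range(i + 1, len(cliques)):
--             if cliques[i] == cliques[j]: continue
--             inter = set(cliques[i]) & set(cliques[j])
--             if len(inter) > 2:
--                 return True
--     return False
-- ===== SOURCE B (Python) =====
-- def bridge_checking(cliques):
--     # Inverted index: sorted 3-element subsets of each clique -> first clique seen
--     # containing them; a collision with a differing clique means a shared >2-intersection.
--     seen = {}
--     for clique in cliques: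
--         elems = sorted(set(clique))
--         n = len(elems)
--         triples = [(elems[a], elems[b], elems[c])
--                    for a in range(n)
--                    for b in range(a + 1, n)
--                    for c in range(b + 1, n)]
--         for key in triples:
--             rep = seen.get(key)
--             if rep is None:
--                 seen[key] = clique
--             elif rep != clique:
--                 return True
--     return False
-- ===== Notes on version B (the rewrite author's own statement) =====
-- stated objective: alternative
-- what changed: Replaces the O(n^2) pairwise set-intersection scan with a single pass that indexes every sorted 3-element subset of each clique in a dict and reports the first collision whose stored representative clique differs from the current one.
import Mathlib
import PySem

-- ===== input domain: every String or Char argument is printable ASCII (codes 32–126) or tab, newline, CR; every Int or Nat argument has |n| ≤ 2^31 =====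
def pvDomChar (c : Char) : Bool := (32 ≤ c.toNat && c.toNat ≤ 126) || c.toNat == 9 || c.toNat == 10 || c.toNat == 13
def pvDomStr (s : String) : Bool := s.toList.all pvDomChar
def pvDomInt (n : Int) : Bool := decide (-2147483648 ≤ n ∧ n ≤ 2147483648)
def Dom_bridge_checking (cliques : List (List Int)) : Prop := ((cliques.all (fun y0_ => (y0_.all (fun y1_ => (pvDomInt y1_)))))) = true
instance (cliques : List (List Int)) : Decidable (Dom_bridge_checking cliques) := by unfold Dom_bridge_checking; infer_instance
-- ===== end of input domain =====

-- B replaces A's O(n^2) pairwise set-intersection scan by a single indexing pass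
-- over sorted 3-element subsets of each clique (alternative algorithm, not claimed faster).

-- ===== PORT A =====
def bridge_checking (cliques : List (List Int)) : Bool :=
  (PySem.List.pyRange 0 (PySem.List.len cliques) 1).any (fun i =>
    (PySem.List.pyRange (i + 1) (PySem.List.len cliques) 1).any (fun j =>
      let ci := PySem.List.pyGetD cliques i []
      let cj := PySem.List.pyGetD cliques j []
      if ci == cj then false
      else
        let inter := PySem.Set.inter (PySem.Set.ofList ci) (PySem.Set.ofList cj)
        decide (2 < PySem.Set.len inter)))

-- ===== PORT B =====
-- the triple comprehension of Source B
def triplesOf (elems : List Int) : List (Int × Int × Int) :=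
  (PySem.List.pyRange 0 (PySem.List.len elems) 1).flatMap (fun a =>
    (PySem.List.pyRange (a + 1) (PySem.List.len elems) 1).flatMap (fun b =>
      (PySem.List.pyRange (b + 1) (PySem.List.len elems) 1).map (fun c =>
        (PySem.List.pyGetD elems a 0, PySem.List.pyGetD elems b 0, PySem.List.pyGetD elems c 0))))

-- the inner 'for key in triples' loop (none = early 'return True')
def scanTriples (clique : List Int) :
    List (Int × Int × Int) → PySem.Dict (Int × Int × Int) (List Int) →
    Option (PySem.Dict (Int × Int × Int) (List Int))
  | [], seen => some seen
  | t :: ts, seen =>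
    match seen.get? t with
    | none => scanTriples clique ts (seen.insert t clique)
    | some rep => if rep == clique then scanTriples clique ts seen else none

-- the outer 'for clique in cliques' loop
def scanCliques : List (List Int) → PySem.Dict (Int × Int × Int) (List Int) → Bool
  | [], _ => false
  | c :: cs, seen =>
    let elems := PySem.List.sorted (PySem.Set.ofList c) (fun x => x) false
    match scanTriples c (triplesOf elems) seen with
    | none => true
    | some seen' => scanCliques cs seen'

def bridge_checking_alt (cliques : List (List Int)) : Bool :=
  scanCliques cliques PySem.Dict.empty

-- ===== PRECONDITION & SPEC =====
def Spec_bridge_checking (cliques : List (List Int)) (out : Bool) : Prop := out = bridge_checking_alt cliques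
instance (cliques : List (List Int)) (out : Bool) : Decidable (Spec_bridge_checking cliques out) := by unfold Spec_bridge_checking; infer_instance

-- ===== CLAIM (what is proved, stated in full; the proofs are below) =====
def Claim_equal_bridge_checking : Prop := ∀ (cliques : List (List Int)), Dom_bridge_checking cliques → Spec_bridge_checking cliques (bridge_checking cliques)

-- ===== LEMMAS AND PROOFS =====

-- a strictly ordered triple of values, all members of x
def Tsem (t : Int × Int × Int) (x : List Int) : Prop :=
  t.1 < t.2.1 ∧ t.2.1 < t.2.2 ∧ t.1 ∈ x ∧ t.2.1 ∈ x ∧ t.2.2 ∈ x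

def Shares3 (x y : List Int) : Prop := ∃ t, Tsem t x ∧ Tsem t y

-- two member cliques with different list values sharing ≥ 3 distinct elements
def Conf (l : List (List Int)) : Prop := ∃ p ∈ l, ∃ q ∈ l, p ≠ q ∧ Shares3 p q

lemma shares3_symm {x y : List Int} (h : Shares3 x y) : Shares3 y x := by
  obtain ⟨t, h1, h2⟩ := h; exact ⟨t, h2, h1⟩

lemma sort3 (u v w : Int) (huv : u ≠ v) (huw : u ≠ w) (hvw : v ≠ w) :
    ∃ a b c : Int, a < b ∧ b < c ∧ a ∈ [u, v, w] ∧ b ∈ [u, v, w] ∧ c ∈ [u, v, w] := by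
  have m1 : u ∈ [u, v, w] := by simp
  have m2 : v ∈ [u, v, w] := by simp
  have m3 : w ∈ [u, v, w] := by simp
  rcases lt_or_gt_of_ne huv with h1 | h1 <;> rcases lt_or_gt_of_ne huw with h2 | h2 <;>
    rcases lt_or_gt_of_ne hvw with h3 | h3
  · exact ⟨u, v, w, h1, h3, m1, m2, m3⟩
  · exact ⟨u, w, v, h2, h3, m1, m3, m2⟩
  · omega
  · exact ⟨w, u, v, h2, h1, m3, m1, m2⟩
  · exact ⟨v, u, w, h1, h2, m2, m1, m3⟩
  · omega
  · exact ⟨v, w, u, h3, h2, m2, m3, m1⟩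
  · exact ⟨w, v, u, h3, h1, m3, m2, m1⟩

lemma inter_len_iff (x y : List Int) :
    2 < PySem.Set.len (PySem.Set.inter (PySem.Set.ofList x) (PySem.Set.ofList y)) ↔ Shares3 x y := by
  have hnd : (PySem.Set.inter (PySem.Set.ofList x) (PySem.Set.ofList y)).Nodup :=
    PySem.Set.nodup_inter _ _ (PySem.Set.nodup_ofList x)
  set S := PySem.Set.inter (PySem.Set.ofList x) (PySem.Set.ofList y) with hS
  have hm : ∀ z : Int, z ∈ S ↔ z ∈ x ∧ z ∈ y := by
    intro z; rw [hS, PySem.Set.mem_inter, PySem.Set.mem_ofList, PySem.Set.mem_ofList]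
  have hlen : PySem.Set.len S = (S.length : Int) := by simp [PySem.Set.len]
  rw [hlen]
  constructor
  · intro h
    have h3 : 2 < S.length := by exact_mod_cast h
    have h0 : 0 < S.length := by omega
    have h1 : 1 < S.length := by omega
    have e01 : S[0] ≠ S[1] := fun e => by
      have := (List.Nodup.getElem_inj_iff hnd).mp e; omega
    have e02 : S[0] ≠ S[2] := fun e => by
      have := (List.Nodup.getElem_inj_iff hnd).mp e; omega
    have e12 : S[1] ≠ S[2] := fun e => by
      have := (List.Nodup.getElem_inj_iff hnd).mp e; omega
    obtain ⟨a, b, c, hab, hbc, ha, hb, hc⟩ := sort3 S[0] S[1] S[2] e01 e02 e12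
    have hmem : ∀ z ∈ [S[0], S[1], S[2]], z ∈ S := by
      intro z hz
      simp only [List.mem_cons, List.not_mem_nil, or_false] at hz
      rcases hz with rfl | rfl | rfl <;> exact List.getElem_mem _
    have hax := (hm a).mp (hmem a ha)
    have hbx := (hm b).mp (hmem b hb)
    have hcx := (hm c).mp (hmem c hc)
    exact ⟨(a, b, c), ⟨hab, hbc, hax.1, hbx.1, hcx.1⟩, ⟨hab, hbc, hax.2, hbx.2, hcx.2⟩⟩
  · rintro ⟨⟨a, b, c⟩, ⟨hab, hbc, hax, hbx, hcx⟩, ⟨-, -, hay, hby, hcy⟩⟩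
    have hab' : a < b := hab
    have hbc' : b < c := hbc
    have haS : a ∈ S := (hm a).mpr ⟨hax, hay⟩
    have hbS : b ∈ S := (hm b).mpr ⟨hbx, hby⟩
    have hcS : c ∈ S := (hm c).mpr ⟨hcx, hcy⟩
    have hsub : ({a, b, c} : Finset Int) ⊆ S.toFinset := by
      intro z hz
      simp only [Finset.mem_insert, Finset.mem_singleton] at hz
      rcases hz with rfl | rfl | rfl <;> exact List.mem_toFinset.mpr (by assumption)
    have hcard : ({a, b, c} : Finset Int).card = 3 := by
      rw [Finset.card_eq_three]
      exact ⟨a, b, c, by omega, by omega, by omega, rfl⟩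

    have hle := Finset.card_le_card hsub
    rw [hcard, List.toFinset_card_of_nodup hnd] at hle
    omega

lemma strict_index_lt (l : List Int) (hpw : l.Pairwise (· < ·)) {i j : Nat}
    (hi : i < l.length) (hj : j < l.length) (hv : l[i] < l[j]) : i < j := by
  rcases Nat.lt_trichotomy i j with h | h | h
  · exact h
  · subst h; omega
  · have := List.pairwise_iff_getElem.mp hpw j i hj hi h; omega

lemma A_iff (cliques : List (List Int)) : bridge_checking cliques = true ↔ Conf cliques := by
  constructor
  · intro h
    simp only [bridge_checking, List.any_eq_true] at h
    obtain ⟨i, hi, j, hj, hcond⟩ := h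
    rw [PySem.List.mem_pyRange_one] at hi hj
    simp only [PySem.List.len_eq] at hi hj
    have hi' : i.toNat < cliques.length := by omega
    have hj' : j.toNat < cliques.length := by omega
    rw [PySem.List.pyGetD_eq_getElem _ _ hi.1 (by omega),
        PySem.List.pyGetD_eq_getElem _ _ (by omega : (0:Int) ≤ j) (by omega)]
      at hcond
    by_cases he : cliques[i.toNat] = cliques[j.toNat]
    · rw [if_pos (by simp [he])] at hcond; cases hcond
    · rw [if_neg (by simp [he])] at hcond
      exact ⟨cliques[i.toNat], List.getElem_mem _, cliques[j.toNat], List.getElem_mem _, he,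
        (inter_len_iff _ _).mp (of_decide_eq_true hcond)⟩
  · rintro ⟨p, hp, q, hq, hpq, hsh⟩
    obtain ⟨i, hi, hie⟩ := List.mem_iff_getElem.mp hp
    obtain ⟨j, hj, hje⟩ := List.mem_iff_getElem.mp hq
    have hij : i ≠ j := by
      rintro rfl; exact hpq (by rw [← hie, ← hje])
    simp only [bridge_checking, List.any_eq_true]
    rcases Nat.lt_or_gt_of_ne hij with hlt | hlt
    · refine ⟨(i : Int), ?_, (j : Int), ?_, ?_⟩
      · rw [PySem.List.mem_pyRange_one]; simp only [PySem.List.len_eq]; omega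
      · rw [PySem.List.mem_pyRange_one]; simp only [PySem.List.len_eq]; omega
      · rw [PySem.List.pyGetD_natCast, PySem.List.pyGetD_natCast,
          List.getD_eq_getElem _ _ hi, List.getD_eq_getElem _ _ hj, hie, hje,
          if_neg (by simp [hpq])]
        exact decide_eq_true ((inter_len_iff _ _).mpr hsh)
    · refine ⟨(j : Int), ?_, (i : Int), ?_, ?_⟩
      · rw [PySem.List.mem_pyRange_one]; simp only [PySem.List.len_eq]; omega
      · rw [PySem.List.mem_pyRange_one]; simp only [PySem.List.len_eq]; omega
      · rw [PySem.List.pyGetD_natCast, PySem.List.pyGetD_natCast,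
          List.getD_eq_getElem _ _ hj, List.getD_eq_getElem _ _ hi, hje, hie,
          if_neg (by simp [Ne.symm hpq])]
        exact decide_eq_true ((inter_len_iff _ _).mpr (shares3_symm hsh))

lemma mem_triplesOf (x : List Int) (t : Int × Int × Int) :
    t ∈ triplesOf (PySem.List.sorted (PySem.Set.ofList x) (fun v => v) false) ↔ Tsem t x := by
  set L := PySem.List.sorted (PySem.Set.ofList x) (fun v => v) false with hL
  have hpw : L.Pairwise (· < ·) := by rw [hL]; exact PySem.List.sorted_ofList_pairwise_lt x
  have hmemL : ∀ v : Int, v ∈ L ↔ v ∈ x := by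
    intro v; rw [hL, PySem.List.mem_sorted, PySem.Set.mem_ofList]
  obtain ⟨u, v, w⟩ := t
  constructor
  · intro ht
    simp only [triplesOf, List.mem_flatMap, List.mem_map] at ht
    obtain ⟨a, haR, b, hbR, c, hcR, heq⟩ := ht
    rw [PySem.List.mem_pyRange_one] at haR hbR hcR
    simp only [PySem.List.len_eq] at haR hbR hcR
    have ha0 : 0 ≤ a := haR.1
    have hb0 : 0 ≤ b := by omega
    have hc0 : 0 ≤ c := by omega
    have ha' : a.toNat < L.length := by omega
    have hb' : b.toNat < L.length := by omega
    have hc' : c.toNat < L.length := by omega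
    rw [PySem.List.pyGetD_eq_getElem _ _ ha0 (by omega),
        PySem.List.pyGetD_eq_getElem _ _ hb0 (by omega),
        PySem.List.pyGetD_eq_getElem _ _ hc0 (by omega)] at heq
    obtain ⟨h1, h2, h3⟩ : L[a.toNat] = u ∧ L[b.toNat] = v ∧ L[c.toNat] = w := by
      simpa [Prod.ext_iff] using heq
    have hvab : L[a.toNat] < L[b.toNat] :=
      List.pairwise_iff_getElem.mp hpw a.toNat b.toNat ha' hb' (by omega)
    have hvbc : L[b.toNat] < L[c.toNat] :=
      List.pairwise_iff_getElem.mp hpw b.toNat c.toNat hb' hc' (by omega)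
    refine ⟨show u < v by omega, show v < w by omega, ?_, ?_, ?_⟩
    · exact (hmemL u).mp (h1 ▸ List.getElem_mem _)
    · exact (hmemL v).mp (h2 ▸ List.getElem_mem _)
    · exact (hmemL w).mp (h3 ▸ List.getElem_mem _)
  · rintro ⟨huv, hvw, hu, hv', hw⟩
    have huv' : u < v := huv
    have hvw' : v < w := hvw
    obtain ⟨i, hi, hie⟩ := List.mem_iff_getElem.mp ((hmemL u).mpr hu)
    obtain ⟨j, hj, hje⟩ := List.mem_iff_getElem.mp ((hmemL v).mpr hv')
    obtain ⟨k, hk, hke⟩ := List.mem_iff_getElem.mp ((hmemL w).mpr hw)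
    have hij : i < j := strict_index_lt L hpw hi hj (by rw [hie, hje]; exact huv)
    have hjk : j < k := strict_index_lt L hpw hj hk (by rw [hje, hke]; exact hvw)
    simp only [triplesOf, List.mem_flatMap, List.mem_map, PySem.List.mem_pyRange_one,
      PySem.List.len_eq]
    refine ⟨(i : Int), ⟨by omega, by omega⟩, (j : Int), ⟨by omega, by omega⟩,
      (k : Int), ⟨by omega, by omega⟩, ?_⟩
    rw [PySem.List.pyGetD_natCast, PySem.List.pyGetD_natCast, PySem.List.pyGetD_natCast]
    rw [List.getD_eq_getElem _ _ hi, List.getD_eq_getElem _ _ hj, List.getD_eq_getElem _ _ hk]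
    rw [hie, hje, hke]

lemma st_none_iff (c : List Int) :
    ∀ (ts : List (Int × Int × Int)) (seen : PySem.Dict (Int × Int × Int) (List Int)),
    scanTriples c ts seen = none ↔ ∃ t ∈ ts, ∃ r, seen.get? t = some r ∧ r ≠ c := by
  intro ts
  induction ts with
  | nil => intro seen; simp [scanTriples]
  | cons t ts ih =>
    intro seen
    cases h : seen.get? t with
    | none =>
      rw [show scanTriples c (t :: ts) seen = scanTriples c ts (seen.insert t c) from by
        simp [scanTriples, h]]
      rw [ih]
      constructor
      · rintro ⟨t', ht', r, hr, hrc⟩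
        rw [PySem.Dict.get?_insert] at hr
        split at hr
        · exact absurd (Option.some.inj hr) (fun e => hrc e.symm)
        · exact ⟨t', List.mem_cons_of_mem _ ht', r, hr, hrc⟩
      · rintro ⟨t', ht', r, hr, hrc⟩
        rcases List.mem_cons.mp ht' with he | hm
        · subst he; rw [h] at hr; cases hr
        · refine ⟨t', hm, r, ?_, hrc⟩
          rw [PySem.Dict.get?_insert]
          split
          · next he => subst he; rw [h] at hr; cases hr
          · exact hr
    | some rep =>
      by_cases hrc : rep = c
      · rw [show scanTriples c (t :: ts) seen = scanTriples c ts seen from by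
          simp [scanTriples, h, hrc]]
        rw [ih]
        constructor
        · rintro ⟨t', ht', r, hr, hne⟩; exact ⟨t', List.mem_cons_of_mem _ ht', r, hr, hne⟩
        · rintro ⟨t', ht', r, hr, hne⟩
          rcases List.mem_cons.mp ht' with he | hm
          · subst he; rw [h] at hr
            exact absurd ((Option.some.inj hr).symm.trans hrc) hne
          · exact ⟨t', hm, r, hr, hne⟩
      · rw [show scanTriples c (t :: ts) seen = none from by simp [scanTriples, h, hrc]]
        exact iff_of_true rfl ⟨t, List.mem_cons_self, rep, h, hrc⟩

lemma st_some_get (c : List Int) :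
    ∀ (ts : List (Int × Int × Int)) (seen seen' : PySem.Dict (Int × Int × Int) (List Int)),
    scanTriples c ts seen = some seen' → ∀ t,
    seen'.get? t = (match seen.get? t with
      | some r => some r
      | none => if t ∈ ts then some c else none) := by
  intro ts
  induction ts with
  | nil =>
    intro seen seen' h t
    simp [scanTriples] at h
    subst h
    cases hx : seen.get? t <;> simp
  | cons u ts ih =>
    intro seen seen' h t
    cases hu : seen.get? u with
    | none =>
      rw [show scanTriples c (u :: ts) seen = scanTriples c ts (seen.insert u c) from by
        simp [scanTriples, hu]] at h
      have hrec := ih _ _ h t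
      rw [hrec, PySem.Dict.get?_insert]
      by_cases htu : t = u
      · subst htu; rw [hu]; simp
      · rw [if_neg htu]
        cases hts : seen.get? t with
        | none => simp [List.mem_cons, htu]
        | some r => simp
    | some rep =>
      by_cases hrc : rep = c
      · rw [show scanTriples c (u :: ts) seen = scanTriples c ts seen from by
          simp [scanTriples, hu, hrc]] at h
        have hrec := ih _ _ h t
        rw [hrec]
        by_cases htu : t = u
        · subst htu; rw [hu]
        · cases hts : seen.get? t with
          | none => simp [List.mem_cons, htu]
          | some r => simp
      · rw [show scanTriples c (u :: ts) seen = none from by simp [scanTriples, hu, hrc]] at h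
        cases h

lemma scan_iff : ∀ (rest : List (List Int)) (seen : PySem.Dict (Int × Int × Int) (List Int))
    (processed : List (List Int)),
    (∀ t r, seen.get? t = some r → r ∈ processed ∧ Tsem t r) →
    (∀ p ∈ processed, ∀ t, Tsem t p → ∃ r, seen.get? t = some r) →
    ¬ Conf processed →
    (scanCliques rest seen = true ↔ Conf (processed ++ rest)) := by
  intro rest
  induction rest with
  | nil =>
    intro seen processed ha hb hc
    rw [List.append_nil]
    exact iff_of_false (by simp [scanCliques]) hc
  | cons c cs ih =>
    intro seen processed ha hb hc
    simp only [scanCliques]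
    cases hst : scanTriples c (triplesOf (PySem.List.sorted (PySem.Set.ofList c) (fun x => x) false)) seen with
    | none =>
      obtain ⟨t, htm, r, hr, hrc⟩ := (st_none_iff c _ seen).mp hst
      have htc : Tsem t c := (mem_triplesOf c t).mp htm
      obtain ⟨hrp, htr⟩ := ha t r hr
      exact iff_of_true rfl ⟨r, List.mem_append_left _ hrp,
        c, List.mem_append_right _ List.mem_cons_self, hrc, ⟨t, htr, htc⟩⟩
    | some seen' =>
      have hget := st_some_get c _ seen seen' hst
      have hnone : ∀ t, t ∈ triplesOf (PySem.List.sorted (PySem.Set.ofList c) (fun x => x) false) →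
          ∀ r, seen.get? t = some r → r = c := by
        intro t htm r hr
        by_contra hne
        exact absurd ((st_none_iff c _ seen).mpr ⟨t, htm, r, hr, hne⟩) (by rw [hst]; simp)
      have ha' : ∀ t r, seen'.get? t = some r → r ∈ processed ++ [c] ∧ Tsem t r := by
        intro t r hr
        rw [hget t] at hr
        cases hs : seen.get? t with
        | some r0 =>
          rw [hs] at hr
          obtain rfl : r0 = r := Option.some.inj hr
          exact ⟨List.mem_append_left _ (ha t r0 hs).1, (ha t r0 hs).2⟩
        | none =>
          rw [hs] at hr
          by_cases htm : t ∈ triplesOf (PySem.List.sorted (PySem.Set.ofList c) (fun x => x) false)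
          · rw [if_pos htm] at hr
            obtain rfl : c = r := Option.some.inj hr
            exact ⟨List.mem_append_right _ List.mem_cons_self, (mem_triplesOf c t).mp htm⟩
          · rw [if_neg htm] at hr; cases hr
      have hb' : ∀ p ∈ processed ++ [c], ∀ t, Tsem t p → ∃ r, seen'.get? t = some r := by
        intro p hp t ht
        rcases List.mem_append.mp hp with hp | hp
        · obtain ⟨r, hr⟩ := hb p hp t ht
          exact ⟨r, by rw [hget t, hr]⟩
        · obtain rfl : p = c := by simpa using hp
          have htm := (mem_triplesOf p t).mpr ht
          cases hs : seen.get? t with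
          | some r0 => exact ⟨r0, by rw [hget t, hs]⟩
          | none => exact ⟨p, by rw [hget t, hs]; simp [htm]⟩
      have hc' : ¬ Conf (processed ++ [c]) := by
        rintro ⟨p, hp, q, hq, hpq, t, htp, htq⟩
        rcases List.mem_append.mp hp with hp2 | hp2 <;> rcases List.mem_append.mp hq with hq2 | hq2
        · exact hc ⟨p, hp2, q, hq2, hpq, t, htp, htq⟩
        · obtain rfl : q = c := by simpa using hq2
          obtain ⟨r, hr⟩ := hb p hp2 t htp
          have hrc : r = q := hnone t ((mem_triplesOf q t).mpr htq) r hr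
          obtain ⟨hrp, htr⟩ := ha t r hr
          exact hc ⟨p, hp2, r, hrp, fun e => hpq (e.trans hrc), t, htp, htr⟩
        · obtain rfl : p = c := by simpa using hp2
          obtain ⟨r, hr⟩ := hb q hq2 t htq
          have hrc : r = p := hnone t ((mem_triplesOf p t).mpr htp) r hr
          obtain ⟨hrp, htr⟩ := ha t r hr
          exact hc ⟨q, hq2, r, hrp, fun e => hpq ((e.trans hrc).symm), t, htq, htr⟩
        · obtain rfl : p = c := by simpa using hp2
          obtain he : q = p := by simpa using hq2
          exact hpq he.symm
      have hrec := ih seen' (processed ++ [c]) ha' hb' hc'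
      rw [List.append_assoc] at hrec
      simpa using hrec

lemma B_iff (cliques : List (List Int)) : bridge_checking_alt cliques = true ↔ Conf cliques := by
  have h := scan_iff cliques PySem.Dict.empty []
    (by intro t r hr; rw [PySem.Dict.get?_empty] at hr; cases hr)
    (by intro p hp; cases hp)
    (by rintro ⟨p, hp, _⟩; cases hp)
  simpa [bridge_checking_alt] using h

-- ===== VERDICT (by name: the statement is the Claim_ definition above) =====
theorem bridge_checking_spec : Claim_equal_bridge_checking := by
  intro cliques _
  show bridge_checking cliques = bridge_checking_alt cliques
  have h := (A_iff cliques).trans (B_iff cliques).symm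
  cases hA : bridge_checking cliques <;> cases hB : bridge_checking_alt cliques <;>
    simp_all
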